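-- pv_equiv track=rewrite | github.com/dai22rosso/RNA | k_means.py | sort_cell
-- ===== SOURCE A (Python) =====
-- def sort_cell(sort_num,pred,cell_name):
--     A=[]
--     for i in range(sort_num):
--         l=[]
--         for ii in range(len(pred)):
--             if(pred[ii]==i):
--                 l.append(cell_name[ii])
--             else:
--                 continue
--         A.append(l)
--     return A
-- ===== SOURCE B (Python) =====
-- def sort_cell(sort_num, pred, cell_name):
--     A = [[] for _ in range(sort_num)]
--     for ii, p in enumerate(pred):
--         if 0 <= p < sort_num:
--             A[p].append(cell_name[ii])
--     return A
-- ===== Notes on version B (the rewrite author's own statement) =====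
-- stated objective: faster
-- what changed: Replaces the sort_num passes over pred (one per cluster label) with a single pass that buckets each cell name directly into A[pred[ii]].
import Mathlib
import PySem

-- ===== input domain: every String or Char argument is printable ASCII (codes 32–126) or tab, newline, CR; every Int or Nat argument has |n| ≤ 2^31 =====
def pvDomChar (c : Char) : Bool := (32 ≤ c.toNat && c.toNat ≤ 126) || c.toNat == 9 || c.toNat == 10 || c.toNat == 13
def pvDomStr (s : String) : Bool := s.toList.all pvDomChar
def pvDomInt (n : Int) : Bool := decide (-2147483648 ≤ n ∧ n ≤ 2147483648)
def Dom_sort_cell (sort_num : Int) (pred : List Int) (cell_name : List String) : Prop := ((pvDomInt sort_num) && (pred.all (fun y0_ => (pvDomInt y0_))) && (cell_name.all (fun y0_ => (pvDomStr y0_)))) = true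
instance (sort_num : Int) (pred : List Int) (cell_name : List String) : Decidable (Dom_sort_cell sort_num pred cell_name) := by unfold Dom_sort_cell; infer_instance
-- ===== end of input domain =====

-- B replaces A's per-cluster rescans of pred by a single bucketing pass (faster in a timing run);
-- return-value equivalence only (neither version mutates its arguments).

-- ===== PORT A =====
-- A: for i in range(sort_num): inner scan of all of pred, collecting cell_name[ii] where pred[ii]==i.
def sort_cell (sort_num : Int) (pred : List Int) (cell_name : List String) : List (List String) :=
  (PySem.List.pyRange 0 sort_num 1).foldl (fun A i =>
    A ++ [(PySem.List.pyRange 0 (PySem.List.len pred) 1).foldl (fun l ii =>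
      if PySem.List.pyGetD pred ii 0 = i then l ++ [PySem.List.pyGetD cell_name ii ""] else l) []]) []

-- ===== PORT B =====
-- B: allocate the sort_num empty buckets, then one pass over enumerate(pred) appending into bucket p.
def sort_cell_alt (sort_num : Int) (pred : List Int) (cell_name : List String) : List (List String) :=
  let A0 : List (List String) := (PySem.List.pyRange 0 sort_num 1).map (fun _ => [])
  (PySem.List.enumerate pred).foldl (fun A p =>
    if 0 ≤ p.2 ∧ p.2 < sort_num then
      A.modify p.2.toNat (fun l => l ++ [PySem.List.pyGetD cell_name p.1 ""])
    else A) A0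

-- ===== PRECONDITION & SPEC =====
-- Pre_ excludes exactly the inputs where Python A raises IndexError: some index ii with a
-- cluster label pred[ii] in range(sort_num) but ii beyond the end of cell_name (B raises there too).
def Pre_sort_cell (sort_num : Int) (pred : List Int) (cell_name : List String) : Prop :=
  ∀ ii ∈ List.range pred.length,
    (0 ≤ pred.getD ii 0 ∧ pred.getD ii 0 < sort_num) → ii < cell_name.length
instance (sort_num : Int) (pred : List Int) (cell_name : List String) : Decidable (Pre_sort_cell sort_num pred cell_name) := by unfold Pre_sort_cell; infer_instance

def pvWitness_sort_cell : Int × List Int × List String := (2, [0, 1, 0, 5], ["a", "b", "c", "d"])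

def Spec_sort_cell (sort_num : Int) (pred : List Int) (cell_name : List String) (out : List (List String)) : Prop := out = sort_cell_alt sort_num pred cell_name
instance (sort_num : Int) (pred : List Int) (cell_name : List String) (out : List (List String)) : Decidable (Spec_sort_cell sort_num pred cell_name out) := by unfold Spec_sort_cell; infer_instance

-- ===== CLAIM (what is proved, stated in full; the proofs are below) =====
def Claim_equal_sort_cell : Prop := ∀ (sort_num : Int) (pred : List Int) (cell_name : List String), Dom_sort_cell sort_num pred cell_name → Pre_sort_cell sort_num pred cell_name → Spec_sort_cell sort_num pred cell_name (sort_cell sort_num pred cell_name)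

-- ===== LEMMAS AND PROOFS =====

-- the bucket of label i collected from an enumerated prediction list
def pvSel (cell_name : List String) (E : List (Int × Int)) (i : Int) : List String :=
  (E.filter (fun p => decide (p.2 = i))).map (fun p => PySem.List.pyGetD cell_name p.1 "")

theorem pvA_eq (sort_num : Int) (pred : List Int) (cell_name : List String) :
    sort_cell sort_num pred cell_name
      = (PySem.List.pyRange 0 sort_num 1).map
          (fun i => pvSel cell_name (PySem.List.enumerate pred) i) := by
  unfold sort_cell
  rw [PySem.List.foldl_append_singleton_eq_map]
  refine List.map_congr_left (fun i _ => ?_)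
  rw [PySem.List.foldl_append_ite (fun ii => PySem.List.pyGetD pred ii 0 = i)
        (fun ii => PySem.List.pyGetD cell_name ii "")]
  simp [pvSel, PySem.List.enumerate_eq_map_pyRange pred 0, List.filter_map, List.map_map,
        Function.comp_def, PySem.List.len]

theorem pvModify_map_pyRange (n : Int) (g : Int → List String) (k : Nat)
    (f : List String → List String) :
    ((PySem.List.pyRange 0 n 1).map g).modify k f
      = (PySem.List.pyRange 0 n 1).map (fun i => if i = (k : Int) then f (g i) else g i) := by
  apply List.ext_getElem
  · simp [List.length_modify]
  · intro j h1 h2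
    simp only [PySem.List.pyRange_one, List.map_map, List.getElem_modify] at *
    simp only [List.getElem_map, List.getElem_range] at *
    rcases Nat.decEq k j with h | h
    · simp [h]
      exact fun hc => absurd hc.symm h
    · simp [h]

theorem pvB_inv (sort_num : Int) (cell_name : List String) (E : List (Int × Int))
    (g : Int → List String) :
    E.foldl (fun A p =>
        if 0 ≤ p.2 ∧ p.2 < sort_num then
          A.modify p.2.toNat (fun l => l ++ [PySem.List.pyGetD cell_name p.1 ""])
        else A) ((PySem.List.pyRange 0 sort_num 1).map g)
      = (PySem.List.pyRange 0 sort_num 1).map (fun i => g i ++ pvSel cell_name E i) := by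
  induction E generalizing g with
  | nil => simp [pvSel]
  | cons p E ih =>
    simp only [List.foldl_cons]
    by_cases h : 0 ≤ p.2 ∧ p.2 < sort_num
    · rw [if_pos h, pvModify_map_pyRange, ih]
      refine List.map_congr_left (fun i hi => ?_)
      have hk : ((p.2.toNat : Int) = p.2) := Int.toNat_of_nonneg h.1
      by_cases hip : i = p.2
      · rw [if_pos (by omega), hip]
        simp [pvSel, List.append_assoc]
      · rw [if_neg (by omega)]
        simp [pvSel, Ne.symm hip]
    · rw [if_neg h, ih]
      refine List.map_congr_left (fun i hi => ?_)
      have hmem := PySem.List.mem_pyRange_one.mp hi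
      have : ¬ (p.2 = i) := by rintro rfl; exact h ⟨hmem.1, hmem.2⟩
      simp [pvSel, this]

theorem pvB_eq (sort_num : Int) (pred : List Int) (cell_name : List String) :
    sort_cell_alt sort_num pred cell_name
      = (PySem.List.pyRange 0 sort_num 1).map
          (fun i => pvSel cell_name (PySem.List.enumerate pred) i) := by
  unfold sort_cell_alt
  have := pvB_inv sort_num cell_name (PySem.List.enumerate pred) (fun _ => [])
  simpa using this

-- ===== VERDICT (by name: the statement is the Claim_ definition above) =====
theorem sort_cell_spec : Claim_equal_sort_cell := by
  intro sort_num pred cell_name _ _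
  unfold Spec_sort_cell
  rw [pvA_eq, pvB_eq]
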